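-- pv_equiv track=rewrite | github.com/vinciliba/QuarterlyReport | enhanced_report_generator_old.py | _select_best_description
-- ===== SOURCE A (Python) =====
-- from typing import Dict, Any, Optional, List
--
-- def _select_best_description(descriptions: List[str], call_type: str) -> str:
--     """Select the best payment description from available options"""
--
--     if not descriptions:
--         return f"{call_type} Payments"
--
--     # Priority keywords for better descriptions
--     priority_keywords = ['pre-financing', 'interim', 'final', 'advance', 'grant']
--
--     # Find descriptions with priority keywords
--     prioritized = []
--     for desc in descriptions:
--         for keyword in priority_keywords:
--             if keyword.lower() in desc.lower():
--                 prioritized.append(desc)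
--                 break
--
--     if prioritized:
--         # Return the shortest prioritized description (usually cleaner)
--         return min(prioritized, key=len)
--     else:
--         # Return the shortest description overall
--         return min(descriptions, key=len)
-- ===== SOURCE B (Python) =====
-- def _select_best_description(descriptions, call_type):
--     """Select the best payment description from available options"""
--     if not descriptions:
--         return f"{call_type} Payments"
--
--     priority_keywords = ['pre-financing', 'interim', 'final', 'advance', 'grant']
--
--     # Single pass with two running accumulators instead of building a filtered
--     # list and calling min(): keep the shortest description seen so far overall,
--     # and the shortest keyword-bearing one; strict '<' keeps first-wins ties.
--     best_any = None
--     best_prio = None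
--     for d in descriptions:
--         if best_any is None or len(d) < len(best_any):
--             best_any = d
--         lowered = d.lower()
--         if any(k in lowered for k in priority_keywords):
--             if best_prio is None or len(d) < len(best_prio):
--                 best_prio = d
--     return best_prio if best_prio is not None else best_any
-- ===== Notes on version B (the rewrite author's own statement) =====
-- stated objective: alternative
-- what changed: A builds a prioritized list with a nested keyword loop and then branches between two min(..., key=len) calls; B makes one explicit pass keeping two running accumulators (shortest-overall and shortest-keyword-bearing) and never materialises a filtered list or calls min().
import Mathlib
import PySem

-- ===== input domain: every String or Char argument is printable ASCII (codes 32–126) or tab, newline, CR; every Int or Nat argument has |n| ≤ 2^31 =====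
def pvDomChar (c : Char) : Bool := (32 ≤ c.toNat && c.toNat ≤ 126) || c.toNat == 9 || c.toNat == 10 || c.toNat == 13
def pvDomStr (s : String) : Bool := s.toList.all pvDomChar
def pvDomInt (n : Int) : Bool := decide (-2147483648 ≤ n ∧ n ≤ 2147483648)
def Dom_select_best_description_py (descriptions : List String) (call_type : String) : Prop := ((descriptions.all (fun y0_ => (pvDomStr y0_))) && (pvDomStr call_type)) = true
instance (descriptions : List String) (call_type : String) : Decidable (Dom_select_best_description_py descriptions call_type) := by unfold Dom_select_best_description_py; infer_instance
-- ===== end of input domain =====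

-- B replaces A's build-a-filtered-list-then-branch-between-two-min-calls with one explicit
-- pass keeping two running accumulators (shortest overall, shortest keyword-bearing)
-- (objective: alternative).

-- ===== PORT A =====
def pvKeywords : List String := ["pre-financing", "interim", "final", "advance", "grant"]

-- A's inner 'for keyword in priority_keywords: if …: append; break' loop, as a Bool ("did we append desc?")
def pvInnerMatch (desc : String) : List String → Bool
  | [] => false
  | kw :: rest =>
      if PySem.Str.isIn (PySem.Str.lower kw) (PySem.Str.lower desc) then true
      else pvInnerMatch desc rest

def select_best_description_py (descriptions : List String) (call_type : String) : String :=
  if descriptions = [] then call_type ++ " Payments"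
  else
    let prioritized :=
      descriptions.foldl (fun acc desc => if pvInnerMatch desc pvKeywords then acc ++ [desc] else acc) []
    if prioritized ≠ [] then
      match PySem.List.min? prioritized (fun d => (PySem.Str.len d : Int)) with
      | some m => m
      | none => ""   -- unreachable: prioritized ≠ []
    else
      match PySem.List.min? descriptions (fun d => (PySem.Str.len d : Int)) with
      | some m => m
      | none => ""   -- unreachable: descriptions ≠ []

-- ===== PORT B =====
def pvHasPriority (desc : String) : Bool :=
  pvKeywords.any (fun k => PySem.Str.isIn k (PySem.Str.lower desc))

-- the body of B's single loop: update (best_any, best_prio) with the next description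
def pvBStep (acc : Option String × Option String) (d : String) : Option String × Option String :=
  let ba := match acc.1 with
    | none => some d
    | some m => if (PySem.Str.len d : Int) < (PySem.Str.len m : Int) then some d else some m
  let bp := if pvHasPriority d then
      match acc.2 with
      | none => some d
      | some m => if (PySem.Str.len d : Int) < (PySem.Str.len m : Int) then some d else some m
    else acc.2
  (ba, bp)

def select_best_description_py_alt (descriptions : List String) (call_type : String) : String :=
  if descriptions = [] then call_type ++ " Payments"
  else
    let r := descriptions.foldl pvBStep (none, none)
    match r.2 with
    | some bp => bp
    | none =>
      match r.1 with
      | some ba => ba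
      | none => ""   -- unreachable: descriptions ≠ []

-- ===== PRECONDITION & SPEC =====
def Spec_select_best_description_py (descriptions : List String) (call_type : String) (out : String) : Prop := out = select_best_description_py_alt descriptions call_type
instance (descriptions : List String) (call_type : String) (out : String) : Decidable (Spec_select_best_description_py descriptions call_type out) := by unfold Spec_select_best_description_py; infer_instance

-- ===== CLAIM (what is proved, stated in full; the proofs are below) =====
def Claim_equal_select_best_description_py : Prop := ∀ (descriptions : List String) (call_type : String), Dom_select_best_description_py descriptions call_type → Spec_select_best_description_py descriptions call_type (select_best_description_py descriptions call_type)

-- ===== LEMMAS AND PROOFS =====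

-- A's inner break-loop over the literal keyword list agrees with B's any-predicate
lemma pvInnerMatch_eq (d : String) : pvInnerMatch d pvKeywords = pvHasPriority d := by
  have h1 : PySem.Str.lower "pre-financing" = "pre-financing" := by decide
  have h2 : PySem.Str.lower "interim" = "interim" := by decide
  have h3 : PySem.Str.lower "final" = "final" := by decide
  have h4 : PySem.Str.lower "advance" = "advance" := by decide
  have h5 : PySem.Str.lower "grant" = "grant" := by decide
  simp [pvKeywords, pvInnerMatch, pvHasPriority, List.any, h1, h2, h3, h4, h5]

lemma min?_app {α : Type} (k : α → Int) (xs : List α) (x : α) :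
    PySem.List.min? (xs ++ [x]) k
      = match PySem.List.min? xs k with
        | none => some x
        | some m => if k x < k m then some x else some m := by
  simp only [PySem.List.min?, List.foldl_append, List.foldl_cons, List.foldl_nil]
  rfl

-- B's single fold computes (min-by-length of the whole list, min-by-length of the keyword-bearing ones)
lemma pvFoldB_eq (ds : List String) :
    ds.foldl pvBStep (none, none)
      = (PySem.List.min? ds (fun d => (PySem.Str.len d : Int)),
         PySem.List.min? (ds.filter pvHasPriority) (fun d => (PySem.Str.len d : Int))) := by
  induction ds using List.reverseRecOn with
  | nil => simp [PySem.List.min?]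
  | append_singleton xs x ih =>
    rw [List.foldl_append, List.foldl_cons, List.foldl_nil, ih, List.filter_append]
    by_cases hx : pvHasPriority x = true
    · simp only [List.filter_cons, List.filter_nil, hx, if_true]
      rw [min?_app, min?_app]
      rcases hA : PySem.List.min? xs (fun d => (PySem.Str.len d : Int)) with _ | m <;>
        rcases hP : PySem.List.min? (xs.filter pvHasPriority) (fun d => (PySem.Str.len d : Int)) with _ | m2 <;>
          simp [pvBStep, hx]
    · have hx' : pvHasPriority x = false := by simpa using hx
      simp only [List.filter_cons, List.filter_nil, hx', Bool.false_eq_true, if_false,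
        List.append_nil]
      rw [min?_app]
      rcases hA : PySem.List.min? xs (fun d => (PySem.Str.len d : Int)) with _ | m <;>
        simp [pvBStep, hx']

-- ===== VERDICT (by name: the statement is the Claim_ definition above) =====
theorem select_best_description_py_spec : Claim_equal_select_best_description_py := by
  intro ds ct _
  unfold Spec_select_best_description_py select_best_description_py select_best_description_py_alt
  by_cases h : ds = []
  · simp [h]
  · simp only [if_neg h, pvInnerMatch_eq,
      PySem.List.foldl_append_if pvHasPriority (fun d => d) ds [], List.nil_append, List.map_id',
      pvFoldB_eq]
    rcases hMP : PySem.List.min? (ds.filter pvHasPriority) (fun d => (PySem.Str.len d : Int)) with _ | m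
    · have hfil : ds.filter pvHasPriority = [] := (PySem.List.min?_eq_none_iff _ _).mp hMP
      rcases hMA : PySem.List.min? ds (fun d => (PySem.Str.len d : Int)) with _ | m
      · exact absurd ((PySem.List.min?_eq_none_iff _ _).mp hMA) h
      · simp [hfil]
    · have hne : ds.filter pvHasPriority ≠ [] := by
        intro hc; rw [hc] at hMP; simp [PySem.List.min?] at hMP
      simp [hne]
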